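-- pv_equiv track=rewrite | github.com/IsaacDsouza/ileetcode | inter6.py | find_smallest_square
-- ===== SOURCE A (Python) =====
-- def find_smallest_square(points):
--     point_set = set(points)
--     n = len(points)
--     min_side = float('inf')
--
--     for i in range(n):
--         x1, y1 = points[i]
--         for j in range(i + 1, n):
--             x2, y2 = points[j]
--
--             # Skip if aligned horizontally or vertically
--             if x1 == x2 or y1 == y2:
--                 continue
--
--             # Check if they can form diagonal corners of a square
--             if abs(x1 - x2) != abs(y1 - y2):
--                 continue
--
--             # The other two points needed to form a square
--             p3 = (x1, y2)
--             p4 = (x2, y1)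
--
--             if p3 in point_set and p4 in point_set:
--                 side = abs(x1 - x2)
--                 min_side = min(min_side, side)
--
--     return 0 if min_side == float('inf') else min_side
-- ===== SOURCE B (Python) =====
-- def find_smallest_square(points):
--     # Index columns: x-coordinate -> set of y-values present at that column.
--     cols = {}
--     for x, y in points:
--         cols.setdefault(x, set()).add(y)
--     best = None
--     # Enumerate candidate squares by their LEFT vertical edge: a pair of
--     # y-values in one column, then a single lookup of the column x + d.
--     for x, ys in cols.items():
--         ylist = list(ys)
--         while ylist:
--             ya = ylist.pop(0)
--             for yb in ylist:
--                 d = abs(ya - yb)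
--                 right = cols.get(x + d, ())
--                 if ya in right and yb in right:
--                     if best is None or d < best:
--                         best = d
--     return 0 if best is None else best
-- ===== Notes on version B (the rewrite author's own statement) =====
-- stated objective: faster
-- what changed: Replaces A's O(n^2) scan over all point pairs treated as square diagonals by a column index (dict x -> set of y's built once): squares are enumerated as vertical edges (pairs of y's within one column) and completed with a single hash lookup of column x+d, so points in different columns are never compared.
import Mathlib
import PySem

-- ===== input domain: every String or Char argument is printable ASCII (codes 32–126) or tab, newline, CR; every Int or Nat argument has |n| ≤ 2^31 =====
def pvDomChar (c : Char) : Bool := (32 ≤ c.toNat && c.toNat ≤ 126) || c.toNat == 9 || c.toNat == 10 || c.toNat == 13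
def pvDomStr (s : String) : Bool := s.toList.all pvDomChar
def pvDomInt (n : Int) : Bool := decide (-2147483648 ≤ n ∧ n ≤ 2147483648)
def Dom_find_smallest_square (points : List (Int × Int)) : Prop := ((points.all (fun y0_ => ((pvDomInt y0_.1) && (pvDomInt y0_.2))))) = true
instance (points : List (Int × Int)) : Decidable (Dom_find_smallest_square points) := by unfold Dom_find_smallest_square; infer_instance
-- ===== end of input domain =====

-- B replaces A's all-pairs diagonal scan by a column index (x ↦ set of y's):
-- it enumerates vertical edges inside each column and checks the column x+d
-- with one lookup; measurably faster on spread-out inputs. Equality of the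
-- RETURN value is proved; neither program mutates its argument.

-- ===== PORT A =====
-- float('inf') sentinel is modelled as `none : Option Int` (min_side is ±∞-free otherwise).
def find_smallest_square (points : List (Int × Int)) : Int :=
  let point_set := PySem.Set.ofList points
  let n : Int := PySem.List.len points
  let min_side : Option Int :=
    (PySem.List.pyRange 0 n 1).foldl (fun acc i =>
      let p := PySem.List.pyGetD points i (0, 0)      -- x1, y1 = points[i] (i in range, exact)
      (PySem.List.pyRange (i + 1) n 1).foldl (fun acc j =>
        let q := PySem.List.pyGetD points j (0, 0)    -- x2, y2 = points[j] (j in range, exact)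
        if p.1 = q.1 ∨ p.2 = q.2 then acc
        else if |p.1 - q.1| ≠ |p.2 - q.2| then acc
        else
          let p3 := (p.1, q.2)
          let p4 := (q.1, p.2)
          if p3 ∈ point_set ∧ p4 ∈ point_set then
            some (match acc with | none => |p.1 - q.1| | some m => min m |p.1 - q.1|)
          else acc) acc) none
  match min_side with
  | none => 0
  | some m => m

-- ===== PORT B =====
-- first loop of Source B: cols[x] = set of y's at column x
def colsOf (points : List (Int × Int)) : PySem.Dict Int (PySem.Set Int) :=
  points.foldl (fun d p => d.modify p.1 PySem.Set.empty (fun s => PySem.Set.add s p.2)) PySem.Dict.empty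

-- the `while ylist: ya = ylist.pop(0); for yb in ylist: …` loop of Source B
def altPairLoop (cols : PySem.Dict Int (PySem.Set Int)) (x : Int) :
    List Int → Option Int → Option Int
  | [], best => best
  | ya :: ylist, best =>
      altPairLoop cols x ylist
        (ylist.foldl (fun best yb =>
          let d := |ya - yb|
          let right := cols.getD (x + d) PySem.Set.empty   -- cols.get(x + d, ())
          if ya ∈ right ∧ yb ∈ right then
            match best with
            | none => some d
            | some m => if d < m then some d else some m
          else best) best)

def find_smallest_square_alt (points : List (Int × Int)) : Int :=
  let cols := colsOf points
  let best : Option Int :=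
    cols.items.foldl (fun best it => altPairLoop cols it.1 it.2 best) none
  match best with
  | none => 0
  | some m => m

-- ===== PRECONDITION & SPEC =====
def Spec_find_smallest_square (points : List (Int × Int)) (out : Int) : Prop := out = find_smallest_square_alt points
instance (points : List (Int × Int)) (out : Int) : Decidable (Spec_find_smallest_square points out) := by unfold Spec_find_smallest_square; infer_instance

-- ===== CLAIM (what is proved, stated in full; the proofs are below) =====
def Claim_equal_find_smallest_square : Prop := ∀ (points : List (Int × Int)), Dom_find_smallest_square points → Spec_find_smallest_square points (find_smallest_square points)

-- ===== LEMMAS AND PROOFS =====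

-- the common "running minimum" update (A's min(min_side, side) with none = inf)
def ominA (acc : Option Int) (v : Int) : Option Int :=
  some (match acc with | none => v | some m => min m v)

-- A's candidate test for the index pair (i, j)
def candA (pset : PySem.Set (Int × Int)) (points : List (Int × Int)) (ij : Int × Int) : Option Int :=
  let p := PySem.List.pyGetD points ij.1 (0, 0)
  let q := PySem.List.pyGetD points ij.2 (0, 0)
  if p.1 = q.1 ∨ p.2 = q.2 then none
  else if |p.1 - q.1| ≠ |p.2 - q.2| then none
  else if (p.1, q.2) ∈ pset ∧ (q.1, p.2) ∈ pset then some |p.1 - q.1| else none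

def candsA (points : List (Int × Int)) : List Int :=
  (((PySem.List.pyRange 0 (PySem.List.len points) 1).flatMap
      (fun i => (PySem.List.pyRange (i + 1) (PySem.List.len points) 1).map (fun j => (i, j)))).filterMap
    (candA (PySem.Set.ofList points) points))

-- B's candidate test for the vertical edge (ya, yb) in column x
def candB (cols : PySem.Dict Int (PySem.Set Int)) (x ya yb : Int) : Option Int :=
  let d := |ya - yb|
  if ya ∈ cols.getD (x + d) PySem.Set.empty ∧ yb ∈ cols.getD (x + d) PySem.Set.empty then some d
  else none

def offDiag : List Int → List (Int × Int)
  | [] => []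
  | a :: t => t.map (fun b => (a, b)) ++ offDiag t

def candsB (points : List (Int × Int)) : List Int :=
  (((colsOf points).items.flatMap
      (fun it => (offDiag it.2).map (fun p => (it.1, p)))).filterMap
    (fun z => candB (colsOf points) z.1 z.2.1 z.2.2))

-- "there is an axis-aligned square of side d with all four corners in points"
def IsSq (points : List (Int × Int)) (d : Int) : Prop :=
  0 < d ∧ ∃ x y, (x, y) ∈ points ∧ (x + d, y) ∈ points ∧ (x, y + d) ∈ points ∧ (x + d, y + d) ∈ points

-- generic fold reshaping
lemma foldl_flatMap' {α β γ : Type} (l : List α) (g : α → List β) (f : γ → β → γ) (i : γ) :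
    (l.flatMap g).foldl f i = l.foldl (fun a x => (g x).foldl f a) i := by
  induction l generalizing i with
  | nil => rfl
  | cons x xs ih => simp [List.flatMap_cons, List.foldl_append, ih]

lemma foldl_filterMap' {α γ : Type} (l : List α) (t : α → Option Int) (f : γ → Int → γ) (i : γ) :
    (l.filterMap t).foldl f i = l.foldl (fun a x => match t x with | some v => f a v | none => a) i := by
  induction l generalizing i with
  | nil => rfl
  | cons x xs ih => cases h : t x <;> simp [h, ih]

lemma foldl_ominA_some (l : List Int) (m : Int) : l.foldl ominA (some m) = some (l.foldl min m) := by
  induction l generalizing m with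
  | nil => rfl
  | cons x xs ih => simpa [ominA] using ih (min m x)

lemma foldl_ominA_none (l : List Int) : l.foldl ominA none = l.min? := by
  cases l with
  | nil => rfl
  | cons a t => simpa [ominA, List.min?] using foldl_ominA_some t a

lemma min?_congr {l₁ l₂ : List Int} (h : ∀ x, x ∈ l₁ ↔ x ∈ l₂) : l₁.min? = l₂.min? := by
  cases h₁ : l₁.min? with
  | none =>
      rw [List.min?_eq_none_iff] at h₁
      subst h₁
      symm; rw [List.min?_eq_none_iff, List.eq_nil_iff_forall_not_mem]
      intro x hx; exact (List.not_mem_nil) ((h x).mpr hx)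
  | some a =>
      rw [List.min?_eq_some_iff] at h₁
      symm; rw [List.min?_eq_some_iff]
      exact ⟨(h a).mp h₁.1, fun b hb => h₁.2 b ((h b).mpr hb)⟩

-- ---- port A as a minimum over candsA ----
lemma bodyA_eq (pset : PySem.Set (Int × Int)) (points : List (Int × Int)) (i : Int) :
    (fun (a : Option Int) (j : Int) => match candA pset points (i, j) with | some v => ominA a v | none => a)
  = (fun (acc : Option Int) (j : Int) =>
        let q := PySem.List.pyGetD points j (0, 0)
        let p := PySem.List.pyGetD points i (0, 0)
        if p.1 = q.1 ∨ p.2 = q.2 then acc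
        else if |p.1 - q.1| ≠ |p.2 - q.2| then acc
        else
          let p3 := (p.1, q.2)
          let p4 := (q.1, p.2)
          if p3 ∈ pset ∧ p4 ∈ pset then
            some (match acc with | none => |p.1 - q.1| | some m => min m |p.1 - q.1|)
          else acc) := by
  funext a j
  simp only [candA, ominA]
  split_ifs <;> rfl

lemma portA_eq (points : List (Int × Int)) :
    find_smallest_square points = match (candsA points).min? with | none => 0 | some m => m := by
  rw [← foldl_ominA_none]
  show (match _ with | none => (0:Int) | some m => m) = _
  congr 1
  unfold candsA
  rw [foldl_filterMap', foldl_flatMap']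
  apply List.foldl_ext
  intro acc i _
  rw [List.foldl_map, bodyA_eq]

-- ---- port B as a minimum over candsB ----
lemma altPairLoop_eq (cols : PySem.Dict Int (PySem.Set Int)) (x : Int) (l : List Int) (best : Option Int) :
    altPairLoop cols x l best
      = (offDiag l).foldl (fun b p => match candB cols x p.1 p.2 with | some v => ominA b v | none => b) best := by
  induction l generalizing best with
  | nil => rfl
  | cons ya ylist ih =>
      rw [altPairLoop, ih, offDiag, List.foldl_append, List.foldl_map]
      congr 1
      apply List.foldl_ext
      intro b yb _
      simp only [candB, ominA]
      split_ifs with h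
      · cases b with
        | none => rfl
        | some m => simp only []; split_ifs with h2 <;> (congr 1; omega)
      · rfl

lemma portB_eq (points : List (Int × Int)) :
    find_smallest_square_alt points = match (candsB points).min? with | none => 0 | some m => m := by
  rw [← foldl_ominA_none]
  show (match _ with | none => (0:Int) | some m => m) = _
  congr 1
  unfold candsB
  rw [foldl_filterMap', foldl_flatMap']
  apply List.foldl_ext
  intro acc it _
  rw [List.foldl_map, altPairLoop_eq]

-- ---- membership characterisations ----
lemma mk_IsSq {points : List (Int × Int)} {xa xb ya yb d : Int}
    (hd : 0 < d) (hx : |xa - xb| = d) (hy : |ya - yb| = d)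
    (h1 : (xa, ya) ∈ points) (h2 : (xa, yb) ∈ points)
    (h3 : (xb, ya) ∈ points) (h4 : (xb, yb) ∈ points) : IsSq points d := by
  have hxne : xa ≠ xb := by intro h; subst h; simp at hx; omega
  have hyne : ya ≠ yb := by intro h; subst h; simp at hy; omega
  refine ⟨hd, ?_⟩
  rcases lt_or_gt_of_ne hxne with hx1 | hx1 <;> rcases lt_or_gt_of_ne hyne with hy1 | hy1
  · have e1 : xb = xa + d := by rw [abs_of_neg (by omega : xa - xb < 0)] at hx; omega
    have e2 : yb = ya + d := by rw [abs_of_neg (by omega : ya - yb < 0)] at hy; omega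
    rw [e1] at h3 h4; rw [e2] at h2 h4
    exact ⟨xa, ya, h1, h3, h2, h4⟩
  · have e1 : xb = xa + d := by rw [abs_of_neg (by omega : xa - xb < 0)] at hx; omega
    have e2 : ya = yb + d := by rw [abs_of_pos (by omega : 0 < ya - yb)] at hy; omega
    rw [e1] at h3 h4; rw [e2] at h1 h3
    exact ⟨xa, yb, h2, h4, h1, h3⟩
  · have e1 : xa = xb + d := by rw [abs_of_pos (by omega : 0 < xa - xb)] at hx; omega
    have e2 : yb = ya + d := by rw [abs_of_neg (by omega : ya - yb < 0)] at hy; omega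
    rw [e1] at h1 h2; rw [e2] at h2 h4
    exact ⟨xb, ya, h3, h1, h4, h2⟩
  · have e1 : xa = xb + d := by rw [abs_of_pos (by omega : 0 < xa - xb)] at hx; omega
    have e2 : ya = yb + d := by rw [abs_of_pos (by omega : 0 < ya - yb)] at hy; omega
    rw [e1] at h1 h2; rw [e2] at h1 h3
    exact ⟨xb, yb, h4, h2, h3, h1⟩

lemma exists_pair_indices {α : Type} (a₀ : α) : ∀ (l : List α) {p q : α}, p ∈ l → q ∈ l → p ≠ q →
    ∃ i j : Nat, i < j ∧ j < l.length ∧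
      ((l.getD i a₀ = p ∧ l.getD j a₀ = q) ∨ (l.getD i a₀ = q ∧ l.getD j a₀ = p)) := by
  intro l
  induction l with
  | nil => intro p q hp _ _; cases hp
  | cons a t ih =>
      intro p q hp hq hne
      by_cases hpa : p = a
      · subst hpa
        have hq' : q ∈ t := by
          rcases List.mem_cons.mp hq with rfl | hq'
          · exact absurd rfl hne
          · exact hq'
        obtain ⟨j, hj, hje⟩ := List.mem_iff_getElem.mp hq'
        exact ⟨0, j + 1, by omega, by simp; omega,
          Or.inl ⟨rfl, by simp [hj, hje]⟩⟩
      · rcases List.mem_cons.mp hp with rfl | hp'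
        · exact absurd rfl hpa
        by_cases hqa : q = a
        · subst hqa
          obtain ⟨j, hj, hje⟩ := List.mem_iff_getElem.mp hp'
          exact ⟨0, j + 1, by omega, by simp; omega,
            Or.inr ⟨rfl, by simp [hj, hje]⟩⟩
        · have hq' : q ∈ t := by
            rcases List.mem_cons.mp hq with rfl | hq'
            · exact absurd rfl hqa
            · exact hq'
          obtain ⟨i, j, hij, hjl, hor⟩ := ih hp' hq' hne
          exact ⟨i + 1, j + 1, by omega, by simp; omega, by simpa [List.getD_cons_succ] using hor⟩

lemma mem_candsA_iff (points : List (Int × Int)) (d : Int) :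
    d ∈ candsA points ↔ IsSq points d := by
  simp only [candsA, List.mem_filterMap, List.mem_flatMap, List.mem_map,
    PySem.List.mem_pyRange_one, PySem.List.len_eq]
  constructor
  · rintro ⟨ij, ⟨i, ⟨hi0, hin⟩, j, ⟨hj1, hjn⟩, rfl⟩, hc⟩
    simp only [candA] at hc
    split_ifs at hc with h1 h2 h3
    rw [not_or] at h1
    rw [not_not] at h2
    have hi' : PySem.Raise.InRange points.length i := by simp [PySem.Raise.InRange]; omega
    have hj' : PySem.Raise.InRange points.length j := by simp [PySem.Raise.InRange]; omega
    have hp := PySem.List.pyGetD_mem points ((0 : Int), (0 : Int)) hi'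
    have hq := PySem.List.pyGetD_mem points ((0 : Int), (0 : Int)) hj'
    obtain ⟨hm3, hm4⟩ := h3
    rw [PySem.Set.mem_ofList] at hm3 hm4
    obtain rfl : |(PySem.List.pyGetD points i (0, 0)).1 - (PySem.List.pyGetD points j (0, 0)).1| = d :=
      Option.some.inj hc
    exact mk_IsSq (abs_pos.mpr (sub_ne_zero.mpr h1.1)) rfl h2.symm
      (by simpa using hp) hm3 hm4 (by simpa using hq)
  · rintro ⟨hd, x, y, c1, c2, c3, c4⟩
    have hne : ((x, y) : Int × Int) ≠ (x + d, y + d) := by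
      intro h; rw [Prod.mk.injEq] at h; omega
    obtain ⟨i, j, hij, hjl, hor⟩ := exists_pair_indices (0, 0) points c1 c4 hne
    have hax : |x - (x + d)| = d := by rw [show x - (x + d) = -d by ring, abs_neg, abs_of_pos hd]
    have hax' : |x + d - x| = d := by rw [show x + d - x = d by ring, abs_of_pos hd]
    have hay : |y - (y + d)| = d := by rw [show y - (y + d) = -d by ring, abs_neg, abs_of_pos hd]
    have hay' : |y + d - y| = d := by rw [show y + d - y = d by ring, abs_of_pos hd]
    refine ⟨((i : Int), (j : Int)),
      ⟨(i : Int), ⟨by omega, by exact_mod_cast lt_trans hij hjl⟩,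
        (j : Int), ⟨by exact_mod_cast hij, by exact_mod_cast hjl⟩, rfl⟩, ?_⟩
    simp only [candA, PySem.List.pyGetD_natCast]
    rcases hor with ⟨e1, e2⟩ | ⟨e1, e2⟩ <;> rw [e1, e2] <;> simp only []
    · rw [if_neg (by rw [not_or]; exact ⟨by omega, by omega⟩), if_neg (by rw [hax, hay]; simp),
        if_pos ⟨by simpa [PySem.Set.mem_ofList] using c3, by simpa [PySem.Set.mem_ofList] using c2⟩, hax]
    · rw [if_neg (by rw [not_or]; exact ⟨by omega, by omega⟩), if_neg (by rw [hax', hay']; simp),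
        if_pos ⟨by simpa [PySem.Set.mem_ofList] using c2, by simpa [PySem.Set.mem_ofList] using c3⟩, hax']

lemma getD_foldl_modify_add (l : List (Int × Int)) (dd : PySem.Dict Int (PySem.Set Int)) (x y : Int) :
    y ∈ (l.foldl (fun d p => d.modify p.1 PySem.Set.empty (fun s => PySem.Set.add s p.2)) dd).getD x PySem.Set.empty
      ↔ y ∈ dd.getD x PySem.Set.empty ∨ (x, y) ∈ l := by
  induction l generalizing dd with
  | nil => simp
  | cons p l ih =>
      rw [List.foldl_cons, ih, PySem.Dict.getD_modify, List.mem_cons]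
      by_cases hx : x = p.1
      · rw [if_pos hx, PySem.Set.mem_add]
        subst hx
        simp only [Prod.ext_iff, true_and]
        tauto
      · rw [if_neg hx]
        have : ¬ ((x, y) = p) := by rw [Prod.ext_iff]; tauto
        tauto

lemma mem_getD_colsOf (points : List (Int × Int)) (x y : Int) :
    y ∈ (colsOf points).getD x PySem.Set.empty ↔ (x, y) ∈ points := by
  rw [colsOf, getD_foldl_modify_add]
  simp [PySem.Dict.getD_empty, PySem.Set.empty]

lemma nodup_getD_foldl_modify_add (l : List (Int × Int)) (dd : PySem.Dict Int (PySem.Set Int)) (x : Int)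
    (h : ∀ x', ((dd.getD x' PySem.Set.empty : PySem.Set Int)).Nodup) :
    ((l.foldl (fun d p => d.modify p.1 PySem.Set.empty (fun s => PySem.Set.add s p.2)) dd).getD x PySem.Set.empty).Nodup := by
  induction l generalizing dd with
  | nil => exact h x
  | cons p l ih =>
      rw [List.foldl_cons]
      apply ih
      intro x'
      rw [PySem.Dict.getD_modify]
      split_ifs
      · exact PySem.Set.nodup_add _ _ (h p.1)
      · exact h x'

lemma nodup_getD_colsOf (points : List (Int × Int)) (x : Int) :
    ((colsOf points).getD x PySem.Set.empty).Nodup := by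
  rw [colsOf]
  exact nodup_getD_foldl_modify_add _ _ _ (fun x' => by simp [PySem.Dict.getD_empty, PySem.Set.empty])

lemma keys_colsOf (points : List (Int × Int)) :
    (colsOf points).keys = PySem.Set.ofList (points.map (·.1)) := by
  rw [colsOf, PySem.Dict.keys_foldl_modify_key points (·.1) PySem.Set.empty (fun _ p s => PySem.Set.add s p.2)]
  simp [PySem.Set.update_nil_left]

lemma nodup_keys_colsOf (points : List (Int × Int)) : (colsOf points).keys.Nodup := by
  rw [keys_colsOf]
  exact PySem.Set.nodup_ofList _

lemma mem_items_colsOf (points : List (Int × Int)) (x : Int) (ys : PySem.Set Int) :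
    (x, ys) ∈ (colsOf points).items ↔ (∃ y, (x, y) ∈ points) ∧ ys = (colsOf points).getD x PySem.Set.empty := by
  rw [PySem.Dict.items_eq_map_keys _ (nodup_keys_colsOf points) PySem.Set.empty]
  simp only [List.mem_map, Prod.mk.injEq]
  constructor
  · rintro ⟨k, hk, rfl, rfl⟩
    rw [keys_colsOf] at hk
    simp only [PySem.Set.mem_ofList, List.mem_map] at hk
    obtain ⟨p, hp, rfl⟩ := hk
    exact ⟨⟨p.2, by simpa using hp⟩, rfl⟩
  · rintro ⟨⟨y, hy⟩, rfl⟩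
    refine ⟨x, ?_, rfl, rfl⟩
    rw [keys_colsOf]
    simp only [PySem.Set.mem_ofList, List.mem_map]
    exact ⟨(x, y), hy, rfl⟩

lemma mem_offDiag (l : List Int) (a b : Int) (h : (a, b) ∈ offDiag l) : a ∈ l ∧ b ∈ l := by
  induction l with
  | nil => cases h
  | cons c t ih =>
      rw [offDiag, List.mem_append, List.mem_map] at h
      rcases h with ⟨b', hb', he⟩ | h
      · rw [Prod.mk.injEq] at he
        obtain ⟨rfl, rfl⟩ := he
        exact ⟨List.mem_cons_self .., List.mem_cons_of_mem _ hb'⟩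
      · obtain ⟨ha, hb⟩ := ih h
        exact ⟨List.mem_cons_of_mem _ ha, List.mem_cons_of_mem _ hb⟩

lemma ne_of_mem_offDiag (l : List Int) (hnd : l.Nodup) (a b : Int) (h : (a, b) ∈ offDiag l) : a ≠ b := by
  induction l with
  | nil => cases h
  | cons c t ih =>
      rw [List.nodup_cons] at hnd
      rw [offDiag, List.mem_append, List.mem_map] at h
      rcases h with ⟨b', hb', he⟩ | h
      · rw [Prod.mk.injEq] at he
        obtain ⟨rfl, rfl⟩ := he
        intro h; subst h; exact hnd.1 hb'
      · exact ih hnd.2 h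

lemma mem_offDiag_of_mem (l : List Int) (a b : Int) (ha : a ∈ l) (hb : b ∈ l) (hne : a ≠ b) :
    (a, b) ∈ offDiag l ∨ (b, a) ∈ offDiag l := by
  induction l with
  | nil => cases ha
  | cons c t ih =>
      rcases List.mem_cons.mp ha with rfl | ha'
      · have hb' : b ∈ t := by
          rcases List.mem_cons.mp hb with rfl | hb'
          · exact absurd rfl hne
          · exact hb'
        exact Or.inl (by rw [offDiag, List.mem_append]; exact Or.inl (List.mem_map.mpr ⟨b, hb', rfl⟩))
      · rcases List.mem_cons.mp hb with rfl | hb'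
        · exact Or.inr (by rw [offDiag, List.mem_append]; exact Or.inl (List.mem_map.mpr ⟨a, ha', rfl⟩))
        · rcases ih ha' hb' with h | h
          · exact Or.inl (by rw [offDiag, List.mem_append]; exact Or.inr h)
          · exact Or.inr (by rw [offDiag, List.mem_append]; exact Or.inr h)

lemma mem_candsB_iff (points : List (Int × Int)) (d : Int) :
    d ∈ candsB points ↔ IsSq points d := by
  simp only [candsB, List.mem_filterMap, List.mem_flatMap, List.mem_map]
  constructor
  · rintro ⟨z, ⟨⟨x, ys⟩, hit, ⟨ya, yb⟩, hod, rfl⟩, hc⟩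
    obtain ⟨⟨y0, hy0⟩, rfl⟩ := (mem_items_colsOf points x ys).mp hit
    simp only [candB] at hc
    split_ifs at hc with hm
    obtain rfl : |ya - yb| = d := Option.some.inj hc
    obtain ⟨hya, hyb⟩ := mem_offDiag _ _ _ hod
    have hne := ne_of_mem_offDiag _ (nodup_getD_colsOf points x) _ _ hod
    rw [mem_getD_colsOf] at hya hyb
    obtain ⟨hra, hrb⟩ := hm
    rw [mem_getD_colsOf] at hra hrb
    exact mk_IsSq (abs_pos.mpr (sub_ne_zero.mpr hne))
      (by rw [show x - (x + |ya - yb|) = -|ya - yb| by ring, abs_neg, abs_abs]) rfl hya hyb hra hrb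
  · rintro ⟨hd, x, y, c1, c2, c3, c4⟩
    have hyy : y ∈ (colsOf points).getD x PySem.Set.empty := (mem_getD_colsOf points x y).mpr c1
    have hyd : y + d ∈ (colsOf points).getD x PySem.Set.empty := (mem_getD_colsOf points x (y + d)).mpr c3
    have hit : (x, (colsOf points).getD x PySem.Set.empty) ∈ (colsOf points).items :=
      (mem_items_colsOf points x _).mpr ⟨⟨y, c1⟩, rfl⟩
    have hay : |y - (y + d)| = d := by rw [show y - (y + d) = -d by ring, abs_neg, abs_of_pos hd]
    have hay' : |y + d - y| = d := by rw [show y + d - y = d by ring, abs_of_pos hd]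
    rcases mem_offDiag_of_mem _ y (y + d) hyy hyd (by omega) with h | h
    · refine ⟨(x, y, y + d), ⟨(x, _), hit, (y, y + d), h, rfl⟩, ?_⟩
      simp only [candB]
      rw [if_pos ⟨by rw [hay, mem_getD_colsOf]; exact c2, by rw [hay, mem_getD_colsOf]; exact c4⟩, hay]
    · refine ⟨(x, y + d, y), ⟨(x, _), hit, (y + d, y), h, rfl⟩, ?_⟩
      simp only [candB]
      rw [if_pos ⟨by rw [hay', mem_getD_colsOf]; exact c4, by rw [hay', mem_getD_colsOf]; exact c2⟩, hay']

-- ===== VERDICT (by name: the statement is the Claim_ definition above) =====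
theorem find_smallest_square_spec : Claim_equal_find_smallest_square := by
  intro points _
  show find_smallest_square points = find_smallest_square_alt points
  rw [portA_eq, portB_eq, min?_congr (fun x => (mem_candsA_iff points x).trans (mem_candsB_iff points x).symm)]
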